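-- pv_equiv track=rewrite | github.com/aymak91/HackerRankSolutions | 2023-02-06/equal_levels.py | updateTimes
-- ===== SOURCE A (Python) =====
-- def updateTimes(signalOne, signalTwo):
--
--     n = min(len(signalOne), len(signalTwo))
--     maxequal = float('-inf')
--     ans = 0
--
--     for i in range(n):
--         num1, num2 = signalOne[i], signalTwo[i]
--
--         if num1 == num2 and num1 > maxequal:
--             ans += 1
--             maxequal = num1
--
--     return ans
-- ===== SOURCE B (Python) =====
-- def updateTimes(signalOne, signalTwo):
--     matches = [a for a, b in zip(signalOne, signalTwo) if a == b]
--     first = {}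
--     for pos, v in enumerate(matches):
--         if v not in first:
--             first[v] = pos
--     count = 0
--     minpos = None
--     for v, pos in sorted(first.items(), key=lambda t: t[0], reverse=True):
--         if minpos is None or pos < minpos:
--             count += 1
--             minpos = pos
--     return count
-- ===== Notes on version B (the rewrite author's own statement) =====
-- stated objective: alternative
-- what changed: Replaces A's single running-max record scan by a sort-based algorithm: collect the first occurrence position of every agreeing value in a dict, sort the (value, position) items by value descending, and count the left-to-right strict minima of the positions.
import Mathlib
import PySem

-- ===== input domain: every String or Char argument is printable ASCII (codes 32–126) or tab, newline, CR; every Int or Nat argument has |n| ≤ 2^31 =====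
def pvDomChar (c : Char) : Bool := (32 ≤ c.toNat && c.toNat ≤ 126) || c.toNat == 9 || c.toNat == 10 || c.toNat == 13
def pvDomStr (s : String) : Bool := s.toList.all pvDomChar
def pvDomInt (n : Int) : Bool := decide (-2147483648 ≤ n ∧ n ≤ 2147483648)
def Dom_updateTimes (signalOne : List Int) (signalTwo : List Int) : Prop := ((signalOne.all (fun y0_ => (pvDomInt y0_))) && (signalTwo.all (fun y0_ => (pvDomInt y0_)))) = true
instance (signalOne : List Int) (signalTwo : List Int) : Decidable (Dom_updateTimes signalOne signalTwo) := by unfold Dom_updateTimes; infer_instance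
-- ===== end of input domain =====

-- A and B are equal; B is a different algorithm: first-occurrence dict + sort by value descending + count minima of positions.
-- ===== PORT A =====
-- running maximum: none plays the role of float('-inf')
def pvGtMax (x : Int) (m : Option Int) : Bool :=
  match m with
  | none => true
  | some v => decide (x > v)

def pvStepA (s1 s2 : List Int) (st : Option Int × Int) (i : Nat) : Option Int × Int :=
  match s1[i]?, s2[i]? with
  | some num1, some num2 =>
      if num1 == num2 && pvGtMax num1 st.1 then (some num1, st.2 + 1) else st
  | _, _ => st

def updateTimes (signalOne : List Int) (signalTwo : List Int) : Int :=
  ((List.range (min signalOne.length signalTwo.length)).foldl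
    (pvStepA signalOne signalTwo) (none, 0)).2

-- ===== PORT B =====
-- `pos < minpos` with minpos = None meaning +infinity
def pvLtMin (p : Int) (m : Option Int) : Bool :=
  match m with
  | none => true
  | some v => decide (p < v)

-- one step of the `if v not in first: first[v] = pos` loop (pv = (pos, v))
def pvFirstStep (d : PySem.Dict Int Int) (pv : Int × Int) : PySem.Dict Int Int :=
  if d.contains pv.2 then d else d.insert pv.2 pv.1

-- one step of the counting loop over the sorted items (vp = (v, pos))
def pvScanStep (st : Option Int × Int) (vp : Int × Int) : Option Int × Int :=
  if pvLtMin vp.2 st.1 then (some vp.2, st.2 + 1) else st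

def updateTimes_alt (signalOne : List Int) (signalTwo : List Int) : Int :=
  let ms := ((signalOne.zip signalTwo).filter (fun p => p.1 == p.2)).map Prod.fst
  let first := (PySem.List.enumerate ms 0).foldl pvFirstStep PySem.Dict.empty
  let pairs := PySem.List.sorted first.items (fun t => t.1) true
  (pairs.foldl pvScanStep (none, 0)).2

-- ===== PRECONDITION & SPEC =====
def Spec_updateTimes (signalOne : List Int) (signalTwo : List Int) (out : Int) : Prop := out = updateTimes_alt signalOne signalTwo
instance (signalOne : List Int) (signalTwo : List Int) (out : Int) : Decidable (Spec_updateTimes signalOne signalTwo out) := by unfold Spec_updateTimes; infer_instance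

-- ===== CLAIM (what is proved, stated in full; the proofs are below) =====
def Claim_equal_updateTimes : Prop := ∀ (signalOne : List Int) (signalTwo : List Int), Dom_updateTimes signalOne signalTwo → Spec_updateTimes signalOne signalTwo (updateTimes signalOne signalTwo)

-- ===== LEMMAS AND PROOFS =====

-- ---------- common vocabulary ----------
-- `k is a record index of ms`: every earlier element is strictly smaller
def pvRecB (ms : List Int) (k : Nat) : Bool :=
  (ms.take k).all (fun y => decide (y < ms.getD k 0))

-- `k is the first occurrence of its value`
def pvFstB (ms : List Int) (k : Nat) : Bool :=
  !((ms.take k).contains (ms.getD k 0))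

-- ---------- A-side: reduce port A to the record count ----------
def pvStepZ (st : Option Int × Int) (p : Int × Int) : Option Int × Int :=
  if p.1 == p.2 && pvGtMax p.1 st.1 then (some p.1, st.2 + 1) else st

def pvStepV (st : Option Int × Int) (a : Int) : Option Int × Int :=
  if pvGtMax a st.1 then (some a, st.2 + 1) else st

theorem pvA_eq_zip (s1 s2 : List Int) (st : Option Int × Int) :
    (List.range (min s1.length s2.length)).foldl (pvStepA s1 s2) st
      = (s1.zip s2).foldl pvStepZ st := by
  induction s1 generalizing s2 st with
  | nil => simp
  | cons a t1 ih =>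
    cases s2 with
    | nil => simp
    | cons b t2 =>
      have hmin : min (a :: t1).length ((b :: t2).length) = min t1.length t2.length + 1 := by
        simp [List.length_cons, Nat.succ_min_succ]
      rw [hmin, List.range_succ_eq_map, List.foldl_cons, List.foldl_map]
      have hstep : ∀ (st : Option Int × Int) (i : Nat),
          pvStepA (a :: t1) (b :: t2) st (i + 1) = pvStepA t1 t2 st i := by
        intro st i; simp [pvStepA]
      have h0 : pvStepA (a :: t1) (b :: t2) st 0 = pvStepZ st (a, b) := by
        simp [pvStepA, pvStepZ]
      calc (List.range (min t1.length t2.length)).foldl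
              (fun st i => pvStepA (a :: t1) (b :: t2) st (i + 1))
              (pvStepA (a :: t1) (b :: t2) st 0)
          = (List.range (min t1.length t2.length)).foldl (pvStepA t1 t2)
              (pvStepZ st (a, b)) := by
            rw [h0]; exact List.foldl_ext _ _ _ (fun x y _ => hstep x y)
        _ = (t1.zip t2).foldl pvStepZ (pvStepZ st (a, b)) := ih t2 _
        _ = ((a :: t1).zip (b :: t2)).foldl pvStepZ st := by simp

theorem pvZip_eq_ms (l : List (Int × Int)) (st : Option Int × Int) :
    l.foldl pvStepZ st
      = ((l.filter (fun p => p.1 == p.2)).map Prod.fst).foldl pvStepV st := by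
  induction l generalizing st with
  | nil => rfl
  | cons p t ih =>
    by_cases h : p.1 = p.2
    · simp [h, pvStepZ, pvStepV, ih]
    · simp [h, pvStepZ, ih]

theorem pvGtMax_step (m : Option Int) (x v : Int) :
    pvGtMax v (if pvGtMax x m then some x else m) = (pvGtMax v m && decide (x < v)) := by
  cases m with
  | none => simp [pvGtMax]
  | some m0 =>
    by_cases h : x > m0 <;> simp [pvGtMax, h] <;> omega

theorem pvV_count (ms : List Int) (m : Option Int) (c : Int) :
    (ms.foldl pvStepV (m, c)).2
      = c + ((List.range ms.length).filter
          (fun k => pvGtMax (ms.getD k 0) m && pvRecB ms k)).length := by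
  induction ms generalizing m c with
  | nil => simp
  | cons x t ih =>
    have hstate : pvStepV (m, c) x
        = ((if pvGtMax x m then some x else m), c + (if pvGtMax x m then 1 else 0)) := by
      by_cases h : pvGtMax x m <;> simp [pvStepV, h]
    rw [List.foldl_cons, hstate, ih]
    have hcond : ∀ k : Nat,
        (pvGtMax ((x :: t).getD (k + 1) 0) m && pvRecB (x :: t) (k + 1))
          = (pvGtMax (t.getD k 0) (if pvGtMax x m then some x else m) && pvRecB t k) := by
      intro k
      rw [pvGtMax_step]
      simp only [List.getD_cons_succ, pvRecB, List.take_succ_cons, List.all_cons]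
      rw [Bool.and_assoc]
    have hhead : (pvGtMax ((x :: t).getD 0 0) m && pvRecB (x :: t) 0) = pvGtMax x m := by
      simp [pvRecB]
    rw [List.length_cons, List.range_succ_eq_map, List.filter_cons, hhead, List.filter_map]
    have hfc : (fun k => pvGtMax ((x :: t).getD k 0) m && pvRecB (x :: t) k) ∘ Nat.succ
        = (fun k => pvGtMax (t.getD k 0) (if pvGtMax x m then some x else m) && pvRecB t k) := by
      funext k; exact hcond k
    rw [hfc]
    by_cases h : pvGtMax x m <;> simp [h, add_assoc, add_comm]

-- ---------- B-side ----------
-- first-occurrence collector, abstractly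
def pvFirsts (seen : List Int) : List (Int × Int) → List (Int × Int)
  | [] => []
  | pv :: r => if pv.2 ∈ seen then pvFirsts seen r
               else (pv.2, pv.1) :: pvFirsts (pv.2 :: seen) r

theorem pvFirsts_congr (s1 s2 : List Int) (E : List (Int × Int))
    (h : ∀ x, x ∈ s1 ↔ x ∈ s2) : pvFirsts s1 E = pvFirsts s2 E := by
  induction E generalizing s1 s2 with
  | nil => rfl
  | cons pv r ih =>
    by_cases hm : pv.2 ∈ s1
    · simp [pvFirsts, hm, (h pv.2).mp hm, ih s1 s2 h]
    · have hm2 : pv.2 ∉ s2 := fun hx => hm ((h pv.2).mpr hx)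
      simp only [pvFirsts, if_neg hm, if_neg hm2]
      exact congrArg _ (ih _ _ (by intro x; simp [h x]))

theorem pvFold_items (E : List (Int × Int)) (d : PySem.Dict Int Int)
    (hnd : d.keys.Nodup) :
    (E.foldl pvFirstStep d).items = d.items ++ pvFirsts d.keys E := by
  induction E generalizing d with
  | nil => simp [pvFirsts]
  | cons pv r ih =>
    rw [List.foldl_cons]
    by_cases h : d.contains pv.2 = true
    · have hm : pv.2 ∈ d.keys := (PySem.Dict.contains_iff_mem_keys d pv.2).mp h
      simp only [pvFirstStep, if_pos h, pvFirsts, if_pos hm]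
      exact ih d hnd
    · have hf : d.contains pv.2 = false := by simpa using h
      have hm : pv.2 ∉ d.keys := fun hx => h ((PySem.Dict.contains_iff_mem_keys d pv.2).mpr hx)
      simp only [pvFirstStep, if_neg h, pvFirsts, if_neg hm]
      rw [ih _ (PySem.Dict.nodup_keys_insert d pv.2 pv.1 hnd),
        PySem.Dict.items_insert_of_not_contains d pv.1 hf,
        pvFirsts_congr ((d.insert pv.2 pv.1).keys) (pv.2 :: d.keys) r
          (by intro x
              rw [PySem.Dict.keys_insert_of_not_contains d pv.1 hf]
              simp [or_comm]),
        List.append_assoc]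
      rfl

-- description of the first-occurrence items for E = enumerate ms s
theorem pvFirsts_enum (ms : List Int) (s : Int) (seen : List Int) :
    pvFirsts seen (PySem.List.enumerate ms s)
      = ((List.range ms.length).filter
          (fun k => !(seen.contains (ms.getD k 0)) && pvFstB ms k)).map
          (fun k => (ms.getD k 0, s + (k : Int))) := by
  induction ms generalizing s seen with
  | nil => simp [pvFirsts]
  | cons x t ih =>
    rw [PySem.List.enumerate_cons, List.length_cons, List.range_succ_eq_map,
      List.filter_cons]
    have hhead : (!(seen.contains ((x :: t).getD 0 0)) && pvFstB (x :: t) 0)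
        = !(seen.contains x) := by simp [pvFstB]
    rw [hhead, List.filter_map]
    have htail : ∀ (seen' : List Int), x ∈ seen' →
        (∀ y, y ≠ x → (y ∈ seen' ↔ y ∈ seen)) →
        ((fun k => !(seen.contains ((x :: t).getD k 0)) && pvFstB (x :: t) k) ∘ Nat.succ)
          = (fun k => !(seen'.contains (t.getD k 0)) && pvFstB t k) := by
      intro seen' hx' hoth
      funext k
      simp only [Function.comp_apply, List.getD_cons_succ, pvFstB, List.take_succ_cons,
        List.contains_eq_mem]
      by_cases hv : t.getD k 0 = x
      · rw [hv]; simp [hx']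
      · have hv' : ¬ t[k]?.getD 0 = x := hv
        have h1 : (t[k]?.getD 0 ∈ seen') ↔ (t[k]?.getD 0 ∈ seen) := hoth _ hv
        simp [hv', h1]
    have hmap : ((fun k : Nat => ((x :: t).getD k 0, s + (k : Int))) ∘ Nat.succ)
        = (fun k : Nat => (t.getD k 0, (s + 1) + (k : Int))) := by
      funext k
      simp only [Function.comp_apply, List.getD_cons_succ, Prod.mk.injEq]
      refine ⟨trivial, ?_⟩
      push_cast
      ring
    by_cases hx : x ∈ seen
    · have hc : (seen.contains x) = true := by
        simpa [List.contains_eq_mem] using hx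
      rw [pvFirsts, if_pos hx, hc, Bool.not_true, if_neg (by simp),
        ih (s + 1) seen, htail seen hx (fun _ _ => Iff.rfl), List.map_map, hmap]
    · have hc : (seen.contains x) = false := by
        simpa [List.contains_eq_mem] using hx
      rw [pvFirsts, if_neg hx, hc, Bool.not_false, if_pos rfl, List.map_cons,
        List.map_map, hmap, ih (s + 1) (x :: seen),
        htail (x :: seen) (List.mem_cons_self)
          (fun y hy => by simp [List.mem_cons, hy])]
      simp

-- the scan counts left-to-right strict minima of the positions
theorem pvScan_count (L : List (Int × Int)) (hp : L.Pairwise (fun a b => b.1 < a.1))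
    (m : Option Int) (c : Int) :
    (L.foldl pvScanStep (m, c)).2
      = c + (L.filter (fun a => pvLtMin a.2 m
          && decide (∀ b ∈ L, a.1 < b.1 → a.2 < b.2))).length := by
  induction L generalizing m c with
  | nil => simp
  | cons a r ih =>
    obtain ⟨hrel, hpr⟩ := List.pairwise_cons.mp hp
    have hdec : decide (∀ b ∈ a :: r, a.1 < b.1 → a.2 < b.2) = true := by
      rw [decide_eq_true_iff]
      intro b hb hlt
      rcases List.mem_cons.mp hb with hb | hb
      · rw [hb] at hlt; omega
      · have := hrel b hb; omega
    have hsplit : ∀ u ∈ r, decide (∀ b ∈ a :: r, u.1 < b.1 → u.2 < b.2)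
        = (decide (u.2 < a.2) && decide (∀ b ∈ r, u.1 < b.1 → u.2 < b.2)) := by
      intro u hu
      have hua : u.1 < a.1 := hrel u hu
      rw [← Bool.decide_and, decide_eq_decide]
      constructor
      · intro hall
        exact ⟨hall a List.mem_cons_self hua,
          fun b hb hlt => hall b (List.mem_cons_of_mem a hb) hlt⟩
      · rintro ⟨h1, h2⟩ b hb hlt
        rcases List.mem_cons.mp hb with hb | hb
        · rw [hb]; exact h1
        · exact h2 b hb hlt
    rw [List.foldl_cons, List.filter_cons, hdec, Bool.and_true]
    by_cases h : pvLtMin a.2 m = true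
    · have hstep : pvScanStep (m, c) a = (some a.2, c + 1) := by
        simp [pvScanStep, h]
      rw [hstep, ih hpr, h, if_pos rfl]
      have hcong : ∀ u ∈ r,
          (pvLtMin u.2 m && decide (∀ b ∈ a :: r, u.1 < b.1 → u.2 < b.2))
            = (pvLtMin u.2 (some a.2) && decide (∀ b ∈ r, u.1 < b.1 → u.2 < b.2)) := by
        intro u hu
        rw [hsplit u hu, ← Bool.and_assoc]
        cases m with
        | none => simp [pvLtMin]
        | some m0 =>
          have ha : a.2 < m0 := by simpa [pvLtMin] using h
          simp only [pvLtMin]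
          by_cases hu2 : u.2 < a.2
          · have hum : u.2 < m0 := by omega
            simp [hu2, hum]
          · simp [hu2]
      rw [List.filter_congr hcong, List.length_cons]
      push_cast
      ring
    · have hstep : pvScanStep (m, c) a = (m, c) := by
        simp [pvScanStep, h]
      obtain ⟨m0, rfl⟩ : ∃ m0, m = some m0 := by
        cases m with
        | none => exact absurd rfl h
        | some m0 => exact ⟨m0, rfl⟩
      have ha : ¬ a.2 < m0 := by simpa [pvLtMin] using h
      have hf : pvLtMin a.2 (some m0) = false := by simpa [pvLtMin] using h
      rw [hstep, ih hpr, hf, if_neg (by simp)]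
      have hcong : ∀ u ∈ r,
          (pvLtMin u.2 (some m0) && decide (∀ b ∈ a :: r, u.1 < b.1 → u.2 < b.2))
            = (pvLtMin u.2 (some m0) && decide (∀ b ∈ r, u.1 < b.1 → u.2 < b.2)) := by
        intro u hu
        rw [hsplit u hu, ← Bool.and_assoc]
        simp only [pvLtMin]
        by_cases hu2 : u.2 < m0
        · have : u.2 < a.2 := by omega
          simp [hu2, this]
        · simp [hu2]
      rw [List.filter_congr hcong]

-- ---------- bridge: first-occurrence items vs record indices ----------
def pvF (ms : List Int) : List (Int × Int) :=
  ((List.range ms.length).filter (pvFstB ms)).map (fun j => (ms.getD j 0, (j : Int)))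

theorem pvMem_F (ms : List Int) (b : Int × Int) :
    b ∈ pvF ms ↔ ∃ j, j < ms.length ∧ pvFstB ms j = true ∧ b = (ms.getD j 0, (j : Int)) := by
  simp only [pvF, List.mem_map, List.mem_filter, List.mem_range]
  constructor
  · rintro ⟨j, ⟨hj, hf⟩, rfl⟩; exact ⟨j, hj, hf, rfl⟩
  · rintro ⟨j, hj, hf, rfl⟩; exact ⟨j, ⟨hj, hf⟩, rfl⟩

theorem pvGetD_mem_take (ms : List Int) (j k : Nat) (hjk : j < k) (hj : j < ms.length) :
    ms.getD j 0 ∈ ms.take k := by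
  have hjl : j < (ms.take k).length := by simp [List.length_take]; omega
  have he : (ms.take k)[j]'hjl = ms[j]'hj := List.getElem_take
  rw [List.getD_eq_getElem ms 0 hj, ← he]
  exact List.getElem_mem hjl

theorem pvMem_take_exists (ms : List Int) (k : Nat) (y : Int) (hy : y ∈ ms.take k) :
    ∃ j, j < k ∧ j < ms.length ∧ ms.getD j 0 = y := by
  obtain ⟨i, hi, he⟩ := List.getElem_of_mem hy
  have hik : i < k := by simp [List.length_take] at hi; omega
  have hil : i < ms.length := by simp [List.length_take] at hi; omega
  refine ⟨i, hik, hil, ?_⟩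
  have he2 : (ms.take k)[i]'hi = ms[i]'hil := List.getElem_take
  rw [List.getD_eq_getElem ms 0 hil, ← he2, he]

theorem pvExists_first (ms : List Int) (y : Int) (hy : y ∈ ms) :
    ∃ j, j < ms.length ∧ ms.getD j 0 = y ∧ pvFstB ms j = true := by
  induction ms with
  | nil => cases hy
  | cons x t ih =>
    by_cases hxy : y = x
    · exact ⟨0, by simp, by simp [hxy], by simp [pvFstB]⟩
    · have hyt : y ∈ t := by
        rcases List.mem_cons.mp hy with h | h
        · exact absurd h hxy
        · exact h
      obtain ⟨j, hj, hv, hf⟩ := ih hyt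
      refine ⟨j + 1, by simpa using hj, by simpa using hv, ?_⟩
      have hc : ((t.take j).contains (t.getD j 0)) = false := by
        simpa [pvFstB] using hf
      simp only [pvFstB, List.take_succ_cons, List.getD_cons_succ, List.contains_cons,
        Bool.not_or, Bool.and_eq_true, Bool.not_eq_true']
      refine ⟨?_, hc⟩
      rw [hv, beq_eq_false_iff_ne]
      omega

theorem pvKey (ms : List Int) (k : Nat) (_hk : k < ms.length) :
    (pvFstB ms k && decide (∀ b ∈ pvF ms, ms.getD k 0 < b.1 → (k : Int) < b.2))
      = pvRecB ms k := by
  rw [Bool.eq_iff_iff, Bool.and_eq_true, decide_eq_true_iff]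
  constructor
  · rintro ⟨hfst, hall⟩
    simp only [pvRecB, List.all_eq_true, decide_eq_true_iff]
    intro y hy
    obtain ⟨j, hjk, hjl, hvj⟩ := pvMem_take_exists ms k y hy
    rcases lt_trichotomy y (ms.getD k 0) with h | h | h
    · exact h
    · exfalso
      have hvin : ms.getD k 0 ∈ ms.take k := h ▸ hy
      have : ¬ (ms.getD k 0 ∈ ms.take k) := by
        simpa [pvFstB, List.contains_eq_mem] using hfst
      exact this hvin
    · exfalso
      have hym : y ∈ ms := List.mem_of_mem_take hy
      obtain ⟨j0, hj0l, hj0v, hj0f⟩ := pvExists_first ms y hym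
      have hb : (y, (j0 : Int)) ∈ pvF ms :=
        (pvMem_F ms _).mpr ⟨j0, hj0l, hj0f, by rw [hj0v]⟩
      have hkj0 : (k : Int) < (j0 : Int) := hall _ hb h
      have hkj0' : k < j0 := by exact_mod_cast hkj0
      have hmem : ms.getD j 0 ∈ ms.take j0 := pvGetD_mem_take ms j j0 (by omega) hjl
      rw [hvj, ← hj0v] at hmem
      have : ¬ (ms.getD j0 0 ∈ ms.take j0) := by
        simpa [pvFstB, List.contains_eq_mem] using hj0f
      exact this hmem
  · intro hrec
    have hrec' : ∀ y ∈ ms.take k, y < ms.getD k 0 := by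
      simpa [pvRecB, List.all_eq_true] using hrec
    constructor
    · simp only [pvFstB, Bool.not_eq_true', List.contains_eq_mem, decide_eq_false_iff_not]
      intro hvin
      exact absurd (hrec' _ hvin) (lt_irrefl _)
    · intro b hb hlt
      obtain ⟨j, hjl, hjf, rfl⟩ := (pvMem_F ms b).mp hb
      simp only at hlt ⊢
      have hjk : k < j := by
        by_contra hle
        rcases Nat.lt_or_ge j k with hj | hj
        · have : ms.getD j 0 ∈ ms.take k := pvGetD_mem_take ms j k hj hjl
          have := hrec' _ this
          omega
        · have : j = k := by omega
          rw [this] at hlt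
          omega
      exact_mod_cast hjk

theorem pvMain (ms : List Int) :
    (ms.foldl pvStepV (none, 0)).2
      = ((PySem.List.sorted
            ((PySem.List.enumerate ms 0).foldl pvFirstStep PySem.Dict.empty).items
            (fun t => t.1) true).foldl pvScanStep (none, 0)).2 := by
  rw [pvV_count]
  -- the dict's items are the first occurrences
  have hitems : ((PySem.List.enumerate ms 0).foldl pvFirstStep PySem.Dict.empty).items
      = pvF ms := by
    rw [pvFold_items _ _ PySem.Dict.nodup_keys_empty]
    have hk : (PySem.Dict.empty : PySem.Dict Int Int).keys = [] := rfl
    have hi : (PySem.Dict.empty : PySem.Dict Int Int).items = [] := rfl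
    rw [hk, hi, pvFirsts_enum, List.nil_append, pvF]
    congr 1
    · funext j
      simp
  rw [hitems]
  -- the sorted items are pairwise strictly decreasing in the value component
  set L := PySem.List.sorted (pvF ms) (fun t => t.1) true with hL
  have hperm : L.Perm (pvF ms) := PySem.List.sorted_perm _ _ _
  have hFnodup : ((pvF ms).map Prod.fst).Nodup := by
    rw [pvF, List.map_map]
    have hpw : ((List.range ms.length).filter (pvFstB ms)).Pairwise (· < ·) :=
      List.pairwise_lt_range.filter _
    have hpw2 : ((List.range ms.length).filter (pvFstB ms)).Pairwise
        (fun a b => ms.getD a 0 ≠ ms.getD b 0) := by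
      refine List.Pairwise.imp_of_mem ?_ hpw
      intro a b ha hb hab heq
      have hbf : pvFstB ms b = true := (List.mem_filter.mp hb).2
      have hal : a < ms.length := List.mem_range.mp (List.mem_filter.mp ha).1
      have hmem : ms.getD a 0 ∈ ms.take b := pvGetD_mem_take ms a b hab hal
      rw [heq] at hmem
      have : ¬ (ms.getD b 0 ∈ ms.take b) := by
        simpa [pvFstB, List.contains_eq_mem] using hbf
      exact this hmem
    exact (List.pairwise_map).mpr (hpw2.imp (fun h => h))
  have hLnodup : (L.map Prod.fst).Nodup := ((hperm.map Prod.fst).nodup_iff).mpr hFnodup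
  have hdesc : L.Pairwise (fun a b => b.1 < a.1) := by
    have hle : L.Pairwise (fun a b => b.1 ≤ a.1) :=
      PySem.List.sorted_pairwise_rev (pvF ms) (fun t => t.1)
    have hne : L.Pairwise (fun a b => a.1 ≠ b.1) := (List.pairwise_map).mp hLnodup
    exact (hle.and hne).imp (fun h => lt_of_le_of_ne h.1 (Ne.symm h.2))
  rw [pvScan_count L hdesc]
  -- replace the quantification over L by one over pvF ms, then drop the permutation
  have hcong1 : ∀ a ∈ L,
      (pvLtMin a.2 none && decide (∀ b ∈ L, a.1 < b.1 → a.2 < b.2))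
        = decide (∀ b ∈ pvF ms, a.1 < b.1 → a.2 < b.2) := by
    intro a _
    rw [show pvLtMin a.2 none = true from rfl, Bool.true_and, decide_eq_decide]
    constructor
    · intro h b hb; exact h b ((PySem.List.mem_sorted _ _ _ b).mpr hb)
    · intro h b hb; exact h b ((PySem.List.mem_sorted _ _ _ b).mp hb)
  rw [List.filter_congr hcong1,
    (hperm.filter (fun a => decide (∀ b ∈ pvF ms, a.1 < b.1 → a.2 < b.2))).length_eq]
  -- pvF is a map over the filtered range
  rw [show (pvF ms).filter (fun a => decide (∀ b ∈ pvF ms, a.1 < b.1 → a.2 < b.2))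
      = (((List.range ms.length).filter (pvFstB ms)).filter
          (fun j => decide (∀ b ∈ pvF ms, ms.getD j 0 < b.1 → (j : Int) < b.2))).map
          (fun j => (ms.getD j 0, (j : Int))) from by
    rw [pvF, List.filter_map]; rfl]
  rw [List.length_map, List.filter_filter]
  have hcong2 : ∀ k ∈ List.range ms.length,
      (decide (∀ b ∈ pvF ms, ms.getD k 0 < b.1 → (k : Int) < b.2) && pvFstB ms k)
        = pvRecB ms k := fun k hk => by
      rw [Bool.and_comm]
      exact pvKey ms k (List.mem_range.mp hk)
  rw [List.filter_congr hcong2]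
  simp [pvGtMax]

theorem updateTimes_spec' : ∀ s1 s2 : List Int, updateTimes s1 s2 = updateTimes_alt s1 s2 := by
  intro s1 s2
  simp only [updateTimes, updateTimes_alt]
  rw [pvA_eq_zip, pvZip_eq_ms, pvMain]

-- ===== VERDICT (by name: the statement is the Claim_ definition above) =====
theorem updateTimes_spec : Claim_equal_updateTimes := by
  intro s1 s2 _
  unfold Spec_updateTimes
  exact updateTimes_spec' s1 s2
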